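-- pv_equiv track=rewrite | github.com/EmmaBin/DSA | cs_electionsWinners.py | solution
-- ===== SOURCE A (Python) =====
-- def solution(votes, k):
--     original_winner = max(votes)
--     count = 1
--     if k==0 and votes.count(original_winner) ==1:
--         return 1
--     for i in votes:
--         if i+k> original_winner:
--             count +=1
--     return count
-- ===== SOURCE B (Python) =====
-- def solution(votes, k):
--     m = max(votes)
--     s = sorted(votes)
--     # count elements with v + k > m, i.e. v > m - k, via binary search on sorted s
--     x = m - k
--     lo, hi = 0, len(s)
--     while lo < hi:
--         mid = (lo + hi) // 2
--         if x < s[mid]: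
--             hi = mid
--         else:
--             lo = mid + 1
--     return 1 + len(s) - lo
-- ===== Notes on version B (the rewrite author's own statement) =====
-- stated objective: alternative
-- what changed: Replaces the linear counting scan (plus the redundant k==0/count shortcut) by sort-then-binary-search: count votes v with v > max-k as len(s) - bisect_right(s, max-k) on the sorted list.
import Mathlib
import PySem

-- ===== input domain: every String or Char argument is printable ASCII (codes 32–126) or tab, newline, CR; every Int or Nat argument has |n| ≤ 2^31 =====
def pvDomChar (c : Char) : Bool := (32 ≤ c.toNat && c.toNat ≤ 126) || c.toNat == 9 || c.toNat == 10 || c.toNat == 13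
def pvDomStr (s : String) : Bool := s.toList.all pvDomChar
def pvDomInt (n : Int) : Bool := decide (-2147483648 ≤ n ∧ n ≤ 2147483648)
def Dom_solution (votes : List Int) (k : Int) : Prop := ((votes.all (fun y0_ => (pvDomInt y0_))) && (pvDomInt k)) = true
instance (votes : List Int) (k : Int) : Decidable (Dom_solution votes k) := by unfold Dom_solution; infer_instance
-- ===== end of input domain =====

-- B replaces the linear counting scan by sort + hand-written binary search (v + k > m  ⟺  v > m - k); alternative algorithm, return value only.

-- ===== PORT A =====
def solution (votes : List Int) (k : Int) : Int :=
  match PySem.List.max? votes (fun x => x) with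
  | none => 0   -- unreachable under Pre_solution: max([]) raises ValueError in Python
  | some m =>
    if k == 0 && PySem.List.count votes m == 1 then 1
    else votes.foldl (fun count i => if i + k > m then count + 1 else count) 1

-- ===== PORT B =====
-- the while lo < hi loop of Source B; s[mid] is in range whenever hi ≤ s.length (exact there)
def bisectLoop (s : List Int) (x : Int) (lo hi : Nat) : Nat :=
  if _h : lo < hi then
    let mid := (lo + hi) / 2
    if x < s.getD mid 0 then bisectLoop s x lo mid
    else bisectLoop s x (mid + 1) hi
  else lo
termination_by hi - lo
decreasing_by all_goals omega

def solution_alt (votes : List Int) (k : Int) : Int :=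
  match PySem.List.max? votes (fun x => x) with
  | none => 0   -- unreachable under Pre_solution: max([]) raises ValueError in Python
  | some m =>
    let s := PySem.List.sorted votes (fun x => x) false
    let lo := bisectLoop s (m - k) 0 s.length
    1 + (s.length : Int) - (lo : Int)

-- ===== PRECONDITION & SPEC =====
-- Pre_ excludes only the empty list, on which Python's max raises ValueError in both A and B.
def Pre_solution (votes : List Int) (k : Int) : Prop := votes ≠ []
instance (votes : List Int) (k : Int) : Decidable (Pre_solution votes k) := by unfold Pre_solution; infer_instance
def pvWitness_solution : List Int × Int := ([3, 1, 5, 5], 2)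

def Spec_solution (votes : List Int) (k : Int) (out : Int) : Prop := out = solution_alt votes k
instance (votes : List Int) (k : Int) (out : Int) : Decidable (Spec_solution votes k out) := by unfold Spec_solution; infer_instance

-- ===== CLAIM (what is proved, stated in full; the proofs are below) =====
def Claim_equal_solution : Prop := ∀ (votes : List Int) (k : Int), Dom_solution votes k → Pre_solution votes k → Spec_solution votes k (solution votes k)

-- ===== LEMMAS AND PROOFS =====

-- binary-search invariant: on a sorted s with hi ≤ |s|, starting from a state whose
-- prefix is ≤ x and whose suffix from hi is > x, the loop returns the split point
theorem bisectLoop_spec (s : List Int) (x : Int) (lo hi : Nat)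
    (hsort : s.Pairwise (· ≤ ·)) (hhi : hi ≤ s.length) (hlohi : lo ≤ hi)
    (hpre : ∀ j (hj : j < s.length), j < lo → s[j] ≤ x)
    (hsuf : ∀ j (hj : j < s.length), hi ≤ j → x < s[j]) :
    (∀ j (hj : j < s.length), j < bisectLoop s x lo hi → s[j] ≤ x) ∧
    (∀ j (hj : j < s.length), bisectLoop s x lo hi ≤ j → x < s[j]) ∧
    bisectLoop s x lo hi ≤ s.length := by
  induction lo, hi using bisectLoop.induct s x with
  | case1 lo hi h mid hlt ih =>
    have hmid : mid < s.length := by omega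
    have hget : s.getD mid 0 = s[mid] := List.getD_eq_getElem s 0 hmid
    rw [bisectLoop, dif_pos h, if_pos (show x < s.getD ((lo + hi) / 2) 0 from hlt)]
    refine ih (by omega) (by omega) hpre (fun j hj hmj => ?_)
    have hx : x < s[mid] := hget ▸ hlt
    rcases Nat.eq_or_lt_of_le hmj with heq | hlt2
    · exact heq ▸ hx
    · exact lt_of_lt_of_le hx ((List.pairwise_iff_getElem.mp hsort) mid j hmid hj hlt2)
  | case2 lo hi h mid hge ih =>
    have hmid : mid < s.length := by omega
    have hget : s.getD mid 0 = s[mid] := List.getD_eq_getElem s 0 hmid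
    rw [bisectLoop, dif_pos h, if_neg (show ¬ x < s.getD ((lo + hi) / 2) 0 from hge)]
    refine ih hhi (by omega) (fun j hj hjm => ?_) hsuf
    have hx : s[mid] ≤ x := not_lt.mp (hget ▸ hge)
    rcases Nat.lt_succ_iff_lt_or_eq.mp hjm with hlt2 | heq
    · exact le_trans ((List.pairwise_iff_getElem.mp hsort) j mid hj hmid hlt2) hx
    · exact heq ▸ hx
  | case3 lo hi h =>
    rw [bisectLoop, dif_neg h]
    exact ⟨hpre, fun j hj hlj => hsuf j hj (by omega), by omega⟩

-- on a sorted s, countP (x < ·) s = |s| - bisectLoop s x 0 |s|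
theorem count_gt_eq (s : List Int) (x : Int) (hsort : s.Pairwise (· ≤ ·)) :
    s.countP (fun v => decide (x < v)) = s.length - bisectLoop s x 0 s.length := by
  obtain ⟨hle, hgt, hr⟩ := bisectLoop_spec s x 0 s.length hsort le_rfl (Nat.zero_le _)
    (fun j hj hj0 => absurd hj0 (Nat.not_lt_zero j))
    (fun j hj hlen => absurd hlen (by omega))
  set r := bisectLoop s x 0 s.length with hrdef
  have hsplit : s.countP (fun v => decide (x < v)) =
      (s.take r).countP (fun v => decide (x < v)) + (s.drop r).countP (fun v => decide (x < v)) := by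
    conv_lhs => rw [← List.take_append_drop r s]
    rw [List.countP_append]
  have h1 : (s.take r).countP (fun v => decide (x < v)) = 0 := by
    rw [List.countP_eq_zero]
    intro a ha
    obtain ⟨i, hi, rfl⟩ := List.mem_iff_getElem.mp ha
    have hilen : i < s.length := by simp [List.length_take] at hi; omega
    rw [List.getElem_take]
    simpa using not_lt.mpr (hle i hilen (by simp [List.length_take] at hi; omega))
  have h2 : (s.drop r).countP (fun v => decide (x < v)) = (s.drop r).length := by
    rw [List.countP_eq_length]
    intro a ha
    obtain ⟨i, hi, rfl⟩ := List.mem_iff_getElem.mp ha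
    have hilen : r + i < s.length := by simp [List.length_drop] at hi; omega
    rw [List.getElem_drop]
    simpa using hgt (r + i) hilen (by omega)
  rw [hsplit, h1, h2, List.length_drop]
  omega

-- A's value is 1 + the number of votes with i + k > m (the k == 0 shortcut returns the same)
theorem a_value (votes : List Int) (k m : Int)
    (hm : PySem.List.max? votes (fun x => x) = some m) :
    solution votes k = 1 + (votes.countP (fun i => decide (i + k > m)) : Int) := by
  unfold solution
  rw [hm]
  dsimp only
  split_ifs with h
  · have h0 : k = 0 := by
      simp only [Bool.and_eq_true, beq_iff_eq] at h
      exact h.1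
    have hz : votes.countP (fun i => decide (i + k > m)) = 0 := by
      rw [List.countP_eq_zero]
      intro a ha
      have := PySem.List.max?_isMax hm a ha
      simp only [decide_eq_true_eq, not_lt, gt_iff_lt]
      simp only [h0, add_zero]
      simpa using this
    simp [hz]
  · rw [PySem.List.foldl_ite_add_one]

theorem solution_eq_alt (votes : List Int) (k : Int) (hpre : votes ≠ []) :
    solution votes k = solution_alt votes k := by
  obtain ⟨m, hm⟩ : ∃ m, PySem.List.max? votes (fun x => x) = some m := by
    cases h : PySem.List.max? votes (fun x => x) with
    | none => exact absurd ((PySem.List.max?_eq_none_iff votes (fun x => x)).mp h) hpre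
    | some m => exact ⟨m, rfl⟩
  rw [a_value votes k m hm]
  unfold solution_alt
  rw [hm]
  have hsort : (PySem.List.sorted votes (fun x => x) false).Pairwise (· ≤ ·) :=
    PySem.List.sorted_pairwise votes (fun x => x)
  have hperm : (PySem.List.sorted votes (fun x => x) false).Perm votes :=
    PySem.List.sorted_perm votes (fun x => x) false
  set s := PySem.List.sorted votes (fun x => x) false with hs
  have hcount : votes.countP (fun i => decide (i + k > m)) =
      s.countP (fun v => decide (m - k < v)) := by
    rw [← hperm.countP_eq]
    apply List.countP_congr
    intro a _
    simp only [decide_eq_true_eq, gt_iff_lt]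
    omega
  have hr : bisectLoop s (m - k) 0 s.length ≤ s.length :=
    (bisectLoop_spec s (m - k) 0 s.length hsort le_rfl (Nat.zero_le _)
      (fun j hj hj0 => absurd hj0 (Nat.not_lt_zero j))
      (fun j hj hlen => absurd hj (by omega))).2.2
  rw [hcount, count_gt_eq s (m - k) hsort]
  push_cast [Nat.cast_sub hr]
  ring

-- ===== VERDICT (by name: the statement is the Claim_ definition above) =====
theorem solution_spec : Claim_equal_solution := by
  intro votes k _ hpre
  exact solution_eq_alt votes k hpre
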